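-- pv_equiv track=rewrite | github.com/Flecart/prosocial-agents | external/gt-harmbench/eval/analysis/lambda_recovery.py | _index_in_action_list
-- ===== SOURCE A (Python) =====
-- def _index_in_action_list(chosen: str, actions: list[str]) -> int | None:
--     """Index of `chosen` in the scenario's ordered action list (case-sensitive, then case-fold)."""
--     if not chosen or not actions:
--         return None
--     for i, a in enumerate(actions):
--         if a == chosen:
--             return i
--     c = chosen.strip().lower()
--     for i, a in enumerate(actions):
--         if a.strip().lower() == c:
--             return i
--     return None
-- ===== SOURCE B (Python) =====
-- def _index_in_action_list(chosen: str, actions: list[str]) -> int | None: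
--     """Single pass: exact match returns immediately; first case-fold match is recorded and used only if no exact match exists."""
--     if not chosen or not actions:
--         return None
--     c = chosen.strip().lower()
--     fold_idx = None
--     for i, a in enumerate(actions):
--         if a == chosen:
--             return i
--         if fold_idx is None and a.strip().lower() == c:
--             fold_idx = i
--     return fold_idx
-- ===== Notes on version B (the rewrite author's own statement) =====
-- stated objective: alternative
-- what changed: Replaces A's two sequential scans (exact, then case-fold) by a single enumerate pass that returns an exact match immediately and carries the first case-fold index in an accumulator used only if no exact match occurs.
import Mathlib
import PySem

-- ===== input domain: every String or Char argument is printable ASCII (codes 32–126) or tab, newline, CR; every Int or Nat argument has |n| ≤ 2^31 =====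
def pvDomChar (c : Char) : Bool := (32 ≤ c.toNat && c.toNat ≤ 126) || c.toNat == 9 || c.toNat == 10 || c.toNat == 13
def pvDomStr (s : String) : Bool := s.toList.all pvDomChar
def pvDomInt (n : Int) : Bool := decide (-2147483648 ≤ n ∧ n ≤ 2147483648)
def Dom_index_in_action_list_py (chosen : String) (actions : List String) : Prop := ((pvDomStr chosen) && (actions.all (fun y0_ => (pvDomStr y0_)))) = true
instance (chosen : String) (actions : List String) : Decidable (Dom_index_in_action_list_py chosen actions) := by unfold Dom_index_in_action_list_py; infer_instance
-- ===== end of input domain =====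

-- B replaces A's two sequential scans by one pass carrying the first case-fold index (alternative decomposition, same cost).

-- ===== PORT A =====
-- first loop of A: first exact match, indices counted from i
def pvExactLoop (chosen : String) : List String → Int → Option Int
  | [], _ => none
  | a :: rest, i => if a == chosen then some i else pvExactLoop chosen rest (i + 1)

-- second loop of A: first case-fold match against c
def pvFoldLoop (c : String) : List String → Int → Option Int
  | [], _ => none
  | a :: rest, i =>
    if PySem.Str.lower (PySem.Str.strip a) == c then some i else pvFoldLoop c rest (i + 1)

def index_in_action_list_py (chosen : String) (actions : List String) : Option Int :=
  if chosen = "" ∨ actions = [] then none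
  else
    match pvExactLoop chosen actions 0 with
    | some i => some i
    | none => pvFoldLoop (PySem.Str.lower (PySem.Str.strip chosen)) actions 0

-- ===== PORT B =====
-- single pass: exact match returns at once, first case-fold index kept in the accumulator
def pvOneLoop (chosen c : String) : List String → Int → Option Int → Option Int
  | [], _, foldIdx => foldIdx
  | a :: rest, i, foldIdx =>
    if a == chosen then some i
    else pvOneLoop chosen c rest (i + 1)
      (if foldIdx.isNone && (PySem.Str.lower (PySem.Str.strip a) == c) then some i else foldIdx)

def index_in_action_list_py_alt (chosen : String) (actions : List String) : Option Int :=
  if chosen = "" ∨ actions = [] then none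
  else pvOneLoop chosen (PySem.Str.lower (PySem.Str.strip chosen)) actions 0 none

-- ===== PRECONDITION & SPEC =====
def Spec_index_in_action_list_py (chosen : String) (actions : List String) (out : Option Int) : Prop := out = index_in_action_list_py_alt chosen actions
instance (chosen : String) (actions : List String) (out : Option Int) : Decidable (Spec_index_in_action_list_py chosen actions out) := by unfold Spec_index_in_action_list_py; infer_instance

-- ===== CLAIM (what is proved, stated in full; the proofs are below) =====
def Claim_equal_index_in_action_list_py : Prop := ∀ (chosen : String) (actions : List String), Dom_index_in_action_list_py chosen actions → Spec_index_in_action_list_py chosen actions (index_in_action_list_py chosen actions)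

-- ===== LEMMAS AND PROOFS =====
theorem pvOneLoop_char (chosen c : String) (l : List String) (i : Int) (foldIdx : Option Int) :
    pvOneLoop chosen c l i foldIdx =
      (match pvExactLoop chosen l i with
       | some j => some j
       | none => match foldIdx with
                 | some j => some j
                 | none => pvFoldLoop c l i) := by
  induction l generalizing i foldIdx with
  | nil => cases foldIdx <;> simp [pvOneLoop, pvExactLoop, pvFoldLoop]
  | cons a rest ih =>
    by_cases h : a == chosen
    · simp [pvOneLoop, pvExactLoop, h]
    · simp only [pvOneLoop, pvExactLoop, pvFoldLoop, h, Bool.false_eq_true, if_false, ih]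
      cases foldIdx with
      | some j => simp
      | none =>
        by_cases hf : PySem.Str.lower (PySem.Str.strip a) == c
        · simp [hf]
        · simp [hf]

-- ===== VERDICT (by name: the statement is the Claim_ definition above) =====
theorem index_in_action_list_py_spec : Claim_equal_index_in_action_list_py := by
  intro chosen actions _
  unfold Spec_index_in_action_list_py index_in_action_list_py index_in_action_list_py_alt
  by_cases h : chosen = "" ∨ actions = []
  · simp [h]
  · simp only [h, if_false]
    rw [pvOneLoop_char]
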